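-- pv_equiv track=rewrite | github.com/Resh94/Resh94 | PythonLearn/programs/prog3.py | solve
-- ===== SOURCE A (Python) =====
-- def solve (A):
--     A = list(A)
--     arrlen = len(A)
--
--     if arrlen%2 == 0 and 1 <= arrlen <= 10**5:
--         firsthalf=A[:int(len(A)/2)]
--         secondhalf=A[int(len(A)/2):]
--         prod = ""
--         prod2 = ""
--         for num, num2 in zip(firsthalf, secondhalf):
--             if 1<= num <= 10**5 and 1<= num2 <= 10**5 :
--                 numstr = str(num)
--                 numstr2 = str(num2)
--                 prod = prod + numstr[0]
--                 prod2 = prod2 + numstr2[len(numstr2)-1]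
--         prod = prod + prod2
--
--         if int(prod) % 11:
--             return('NON')
--         else :
--             return('OUI')
-- ===== SOURCE B (Python) =====
-- def solve(A):
--     n = len(A)
--     if n % 2 != 0 or n == 0 or n > 10**5:
--         return None
--     half = n // 2
--     h1 = h2 = 0
--     k = 0
--     for a, b in zip(A, A[half:]):
--         if 1 <= a <= 10**5 and 1 <= b <= 10**5:
--             d = a
--             while d >= 10:
--                 d //= 10
--             h1 = (h1 * 10 + d) % 11
--             h2 = (h2 * 10 + b % 10) % 11
--             k += 1
--     r = (h1 * (10 if k % 2 else 1) + h2) % 11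
--     return 'NON' if r else 'OUI'
-- ===== Notes on version B (the rewrite author's own statement) =====
-- stated objective: alternative
-- what changed: B never builds the digit string nor parses it back with int(): it keeps two running Horner remainders mod 11 (one per digit block) and a pair count in a single pass, then combines them with 10^k mod 11 (which is 1 or 10), so only O(1)-size integers are ever handled.
import Mathlib
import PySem

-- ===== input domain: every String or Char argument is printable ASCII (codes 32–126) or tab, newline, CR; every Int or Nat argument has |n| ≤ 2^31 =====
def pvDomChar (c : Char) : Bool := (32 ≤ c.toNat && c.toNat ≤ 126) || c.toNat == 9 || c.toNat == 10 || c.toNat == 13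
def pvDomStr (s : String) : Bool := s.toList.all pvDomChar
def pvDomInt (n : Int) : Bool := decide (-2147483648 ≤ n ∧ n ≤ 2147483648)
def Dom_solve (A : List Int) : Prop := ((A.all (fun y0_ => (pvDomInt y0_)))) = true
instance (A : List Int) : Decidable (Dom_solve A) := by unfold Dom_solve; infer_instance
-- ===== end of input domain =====

-- B never materialises the digit string and never parses it back with int(): it keeps two
-- running Horner remainders mod 11 and a pair count in one pass and combines them with
-- 10^k mod 11 (which is 1 or 10), so no big-integer value is ever built (objective: alternative).

-- ===== PORT A =====
-- int(prod), ported by hand (PySem.Int.ofChars?'s helper is private and cannot be reasoned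
-- about symbolically): prod consists of decimal digit characters only, so int() is exactly
-- ValueError on '' (= none) and otherwise the left-to-right Horner value of the digits.
def pyIntDigits? (cs : List Char) : Option Int :=
  match cs with
  | [] => none
  | _ => some (cs.foldl (fun a c => a * 10 + ((c.toNat : Int) - 48)) 0)

def solve (A : List Int) : Option String :=
  let arrlen : Int := (A.length : Int)
  if PySem.Int.mod arrlen 2 = 0 ∧ 1 ≤ arrlen ∧ arrlen ≤ 10^5 then
    -- int(len(A)/2): float true division then truncation; exact as floor division here
    -- (arrlen is even, nonnegative and ≤ 10^5, far below float precision loss)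
    let half : Int := PySem.Int.floordiv arrlen 2
    let firsthalf := PySem.List.slice A none (some half)
    let secondhalf := PySem.List.slice A (some half) none
    let pr := (firsthalf.zip secondhalf).foldl
      (fun (pr : List Char × List Char) nn =>
        if 1 ≤ nn.1 ∧ nn.1 ≤ 10^5 ∧ 1 ≤ nn.2 ∧ nn.2 ≤ 10^5 then
          let numstr := PySem.Int.toChars nn.1
          let numstr2 := PySem.Int.toChars nn.2
          -- numstr[0] / numstr2[len(numstr2)-1]: str(num) is never empty, so the
          -- IndexError branch is unreachable and the .getD default is never read
          (pr.1 ++ [(PySem.List.pyGet? numstr 0).getD ' '],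
           pr.2 ++ [(PySem.List.pyGet? numstr2 ((numstr2.length : Int) - 1)).getD ' '])
        else pr) ([], [])
    let prod := pr.1 ++ pr.2
    match pyIntDigits? prod with   -- int(prod); none = ValueError (excluded by Pre_)
    | none => none
    | some v => if PySem.Int.mod v 11 ≠ 0 then some "NON" else some "OUI"
  else none

-- ===== PORT B =====
-- leading digit: while d >= 10: d //= 10
def pvLead (d : Int) : Int :=
  if h : 10 ≤ d then pvLead (PySem.Int.floordiv d 10) else d
  termination_by d.toNat
  decreasing_by
    rw [PySem.Int.floordiv_eq_ediv_of_pos (by omega)]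
    omega

def solve_alt (A : List Int) : Option String :=
  let n : Int := (A.length : Int)
  if PySem.Int.mod n 2 ≠ 0 ∨ n = 0 ∨ n > 10^5 then none
  else
    let half : Int := PySem.Int.floordiv n 2
    let st := (A.zip (PySem.List.slice A (some half) none)).foldl
      (fun (st : Int × Int × Int) p =>
        if 1 ≤ p.1 ∧ p.1 ≤ 10^5 ∧ 1 ≤ p.2 ∧ p.2 ≤ 10^5 then
          (PySem.Int.mod (st.1 * 10 + pvLead p.1) 11,
           PySem.Int.mod (st.2.1 * 10 + PySem.Int.mod p.2 10) 11,
           st.2.2 + 1)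
        else st) (0, 0, 0)
    let r := PySem.Int.mod (st.1 * (if PySem.Int.mod st.2.2 2 ≠ 0 then 10 else 1) + st.2.1) 11
    if r ≠ 0 then some "NON" else some "OUI"

-- ===== PRECONDITION & SPEC =====
-- Pre_ excludes exactly the inputs on which Python A raises ValueError (int('') on an
-- even-length, nonempty list in range where NO pair passes the 1..10^5 bounds test).
def Pre_solve (A : List Int) : Prop :=
  (PySem.Int.mod (A.length : Int) 2 = 0 ∧ 1 ≤ (A.length : Int) ∧ (A.length : Int) ≤ 10^5) →
    ∃ p ∈ A.zip (A.drop (A.length / 2)),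
      1 ≤ p.1 ∧ p.1 ≤ 10^5 ∧ 1 ≤ p.2 ∧ p.2 ≤ 10^5
instance (A : List Int) : Decidable (Pre_solve A) := by unfold Pre_solve; infer_instance
def pvWitness_solve : List Int := ([3, 8])

def Spec_solve (A : List Int) (out : Option String) : Prop := out = solve_alt A
instance (A : List Int) (out : Option String) : Decidable (Spec_solve A out) := by unfold Spec_solve; infer_instance

-- ===== CLAIM (what is proved, stated in full; the proofs are below) =====
def Claim_equal_solve : Prop := ∀ (A : List Int), Dom_solve A → Pre_solve A → Spec_solve A (solve A)

-- ===== LEMMAS AND PROOFS =====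

-- Nat.toDigits is the reversed digit list rendered through Nat.digitChar
lemma toDigitsCore_eq (f : Nat) : ∀ (n : Nat) (ds : List Char), n ≠ 0 → n < 10 ^ f →
    Nat.toDigitsCore 10 f n ds = ((Nat.digits 10 n).map Nat.digitChar).reverse ++ ds := by
  induction f with
  | zero => intro n ds h0 hf; omega
  | succ f ih =>
    intro n ds h0 hf
    rw [Nat.toDigitsCore]
    by_cases hq : n / 10 = 0
    · have hn : n < 10 := by omega
      simp [hq, Nat.digits_def' (by norm_num : 1 < 10) (by omega : 0 < n),
        Nat.div_eq_of_lt hn]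
    · have h1 : n / 10 < 10 ^ f := by
        have : n < 10 * 10 ^ f := by
          calc n < 10 ^ (f + 1) := hf
          _ = 10 * 10 ^ f := by ring
        omega
      simp only [hq, if_false]
      rw [ih (n / 10) _ hq h1,
        Nat.digits_def' (by norm_num : 1 < 10) (by omega : 0 < n)]
      simp

lemma toDigits_eq_digits (n : Nat) (h : n ≠ 0) :
    Nat.toDigits 10 n = ((Nat.digits 10 n).map Nat.digitChar).reverse := by
  have hlt : n < 10 ^ (n + 1) := by
    calc n < 10 ^ n := Nat.lt_pow_self (by norm_num)
    _ ≤ 10 ^ (n + 1) := Nat.pow_le_pow_right (by norm_num) (by omega)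
  rw [Nat.toDigits, toDigitsCore_eq (n + 1) n [] h hlt, List.append_nil]

lemma toChars_pos (a : Int) (h : 1 ≤ a) :
    PySem.Int.toChars a = ((Nat.digits 10 a.toNat).map Nat.digitChar).reverse := by
  rw [PySem.Int.toChars, if_neg (by omega), toDigits_eq_digits _ (by omega)]

lemma digitChar_eq_ofNat (d : Nat) (h : d < 10) : Nat.digitChar d = Char.ofNat (48 + d) := by
  interval_cases d <;> decide

-- the division loop computes the most significant (= last in Nat.digits) digit
lemma pvLead_eq_getLast (k : Nat) (h : k ≠ 0) :
    (Nat.digits 10 k).getLast? = some (pvLead (k : Int)).toNat := by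
  induction k using Nat.strong_induction_on with
  | _ k ih =>
    rw [Nat.digits_def' (by norm_num : 1 < 10) (by omega : 0 < k)]
    by_cases hk : k < 10
    · have h0 : k / 10 = 0 := by omega
      rw [pvLead, dif_neg (by omega)]
      simp [h0]
      omega
    · have h10 : PySem.Int.floordiv (k : Int) 10 = ((k / 10 : Nat) : Int) := by
        rw [PySem.Int.floordiv_eq_ediv_of_pos (by omega)]
        omega
      rw [pvLead, dif_pos (by omega : (10:Int) ≤ (k:Int)), h10, List.getLast?_cons,
        ih (k / 10) (by omega) (by omega)]
      rfl

lemma pvLead_lt (a : Int) (h : 1 ≤ a) : (pvLead a).toNat < 10 := by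
  have hk : a.toNat ≠ 0 := by omega
  have hL := pvLead_eq_getLast a.toNat hk
  rw [(by omega : ((a.toNat : Nat) : Int) = a)] at hL
  exact Nat.digits_lt_base (by norm_num) (List.mem_of_getLast? hL)

lemma pvLead_pos (a : Int) (h : 1 ≤ a) : 1 ≤ pvLead a := by
  have hk : a.toNat ≠ 0 := by omega
  have hL := pvLead_eq_getLast a.toNat hk
  rw [(by omega : ((a.toNat : Nat) : Int) = a)] at hL
  have hne : Nat.digits 10 a.toNat ≠ [] := Nat.digits_ne_nil_iff_ne_zero.mpr hk
  have h0 := Nat.getLast_digit_ne_zero 10 hk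
  rw [List.getLast?_eq_some_getLast hne] at hL
  have : (Nat.digits 10 a.toNat).getLast hne = (pvLead a).toNat := by
    exact Option.some.inj hL
  omega

-- first character of str(a) for a ≥ 1
lemma first_char_eq (a : Int) (h : 1 ≤ a) :
    (PySem.List.pyGet? (PySem.Int.toChars a) 0).getD ' '
      = Char.ofNat (48 + (pvLead a).toNat) := by
  have hk : a.toNat ≠ 0 := by omega
  have hL := pvLead_eq_getLast a.toNat hk
  rw [(by omega : ((a.toNat : Nat) : Int) = a)] at hL
  rw [toChars_pos a h, PySem.List.pyGet?_zero, ← List.head?_eq_getElem?,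
    List.head?_reverse, List.getLast?_map, hL]
  simp [digitChar_eq_ofNat _ (pvLead_lt a h)]

-- last character of str(b) for b ≥ 1
lemma last_char_eq (b : Int) (h : 1 ≤ b) :
    (PySem.List.pyGet? (PySem.Int.toChars b)
        (((PySem.Int.toChars b).length : Int) - 1)).getD ' '
      = Char.ofNat (48 + (PySem.Int.mod b 10).toNat) := by
  have hk : b.toNat ≠ 0 := by omega
  have hmod : (PySem.Int.mod b 10).toNat = b.toNat % 10 := by
    rw [PySem.Int.mod_eq_emod_of_pos (by omega)]
    omega
  rw [toChars_pos b h]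
  have hne : ((Nat.digits 10 b.toNat).map Nat.digitChar).reverse.length ≠ 0 := by
    simp [Nat.digits_ne_nil_iff_ne_zero.mpr hk]
  have hcast : ((((Nat.digits 10 b.toNat).map Nat.digitChar).reverse.length : Nat) : Int) - 1
      = (((((Nat.digits 10 b.toNat).map Nat.digitChar).reverse.length - 1 : Nat)) : Int) := by
    omega
  rw [hcast, PySem.List.pyGet?_natCast, ← List.getLast?_eq_getElem?, List.getLast?_reverse,
    List.head?_map, Nat.digits_def' (by norm_num : 1 < 10) (by omega : 0 < b.toNat)]
  simp only [List.head?_cons, Option.map_some, Option.getD_some]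
  rw [digitChar_eq_ofNat _ (by omega : b.toNat % 10 < 10), hmod]

-- zipping with the second half truncates the first list to the first half
lemma zip_take_of_len_le {α β : Type} :
    ∀ (l2 : List β) (l1 : List α) (n : Nat), l2.length ≤ n →
      (l1.take n).zip l2 = l1.zip l2 := by
  intro l2
  induction l2 with
  | nil => simp
  | cons y ys ih =>
    intro l1 n hn
    cases l1 with
    | nil => simp
    | cons x xs =>
      cases n with
      | zero => simp at hn
      | succ m => simp [List.take_succ_cons, ih xs m (by simpa using hn)]

-- the two-accumulator fold is filter-then-map on each component
lemma foldl_pair_eq {α : Type} (Q : α → Prop) [DecidablePred Q]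
    (F G : α → Char) :
    ∀ (l : List α) (p1 p2 : List Char),
      l.foldl (fun (pr : List Char × List Char) x =>
          if Q x then (pr.1 ++ [F x], pr.2 ++ [G x]) else pr) (p1, p2)
        = (p1 ++ (l.filter (fun x => decide (Q x))).map F,
           p2 ++ (l.filter (fun x => decide (Q x))).map G) := by
  intro l
  induction l with
  | nil => simp
  | cons x xs ih =>
    intro p1 p2
    by_cases h : Q x
    · simp [h, ih]
    · simp [h, ih]

-- plain Horner value of an Int digit list
def pvVal (ds : List Int) : Int := ds.foldl (fun a d => a * 10 + d) 0

lemma pvVal_acc : ∀ (ds : List Int) (a : Int),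
    ds.foldl (fun a d => a * 10 + d) a = a * 10 ^ ds.length + pvVal ds := by
  intro ds
  induction ds with
  | nil => intro a; simp [pvVal]
  | cons d ds ih =>
    intro a
    simp only [List.foldl_cons, List.length_cons, pvVal] at *
    rw [ih (a * 10 + d), ih (0 * 10 + d)]
    ring

lemma pvVal_append (xs ys : List Int) :
    pvVal (xs ++ ys) = pvVal xs * 10 ^ ys.length + pvVal ys := by
  rw [pvVal, List.foldl_append, ← pvVal, pvVal_acc]

-- the running-remainder fold is the Horner value mod 11
lemma hornerMod_eq : ∀ (ds : List Int) (a : Int),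
    ds.foldl (fun a d => (a * 10 + d) % 11) (a % 11)
      = (ds.foldl (fun a d => a * 10 + d) a) % 11 := by
  intro ds
  induction ds with
  | nil => intro a; simp
  | cons d ds ih =>
    intro a
    simp only [List.foldl_cons]
    have hstep : a * 10 + d = (a % 11 * 10 + d) + 11 * (a / 11 * 10) := by
      rw [Int.emod_def]; ring
    rw [show (a % 11 * 10 + d) % 11 = (a * 10 + d) % 11 by
      conv_rhs => rw [hstep]
      rw [Int.add_mul_emod_self_left]]
    exact ih (a * 10 + d)

lemma tenpow_mod (k : Nat) : (10:Int) ^ k % 11 = if k % 2 = 0 then 1 else 10 := by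
  induction k with
  | zero => decide
  | succ k ih =>
    rw [pow_succ, Int.mul_emod, ih]
    by_cases h : k % 2 = 0
    · rw [if_pos h, if_neg (by omega)]; norm_num
    · rw [if_neg h, if_pos (by omega)]; norm_num

lemma pyIntDigits?_ne_nil (cs : List Char) (h : cs ≠ []) :
    pyIntDigits? cs = some (cs.foldl (fun a c => a * 10 + ((c.toNat : Int) - 48)) 0) := by
  cases cs with
  | nil => exact absurd rfl h
  | cons c t => rfl

lemma char_toNat_digit (t : Nat) (h : t < 10) : (Char.ofNat (48 + t)).toNat = 48 + t := by
  interval_cases t <;> decide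

-- a list of digit characters, read back digit by digit, is the digit list's Horner fold
lemma foldl_digit_chars (ds : List Int) (h : ∀ d ∈ ds, 0 ≤ d ∧ d < 10) (a : Int) :
    (ds.map (fun d => Char.ofNat (48 + d.toNat))).foldl
        (fun a c => a * 10 + ((c.toNat : Int) - 48)) a
      = ds.foldl (fun a d => a * 10 + d) a := by
  rw [List.foldl_map]
  apply PySem.List.foldl_congr_mem
  intro acc x hx
  have hb := h x hx
  rw [char_toNat_digit x.toNat (by omega)]
  omega

lemma foldl_count_len {α : Type} : ∀ (l : List α) (c : Int),
    l.foldl (fun c _ => c + 1) c = c + l.length := by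
  intro l
  induction l with
  | nil => intro c; simp
  | cons x xs ih => intro c; simp [ih]; omega

-- ===== VERDICT (by name: the statement is the Claim_ definition above) =====
theorem solve_spec : Claim_equal_solve := by
  intro A _hDom hPre
  unfold Spec_solve solve solve_alt
  dsimp only
  have hmod2 : PySem.Int.mod ((A.length : Nat) : Int) 2 = (A.length : Int) % 2 :=
    PySem.Int.mod_eq_emod_of_pos (by omega)
  by_cases hg : PySem.Int.mod ((A.length : Nat) : Int) 2 = 0 ∧
      1 ≤ (A.length : Int) ∧ (A.length : Int) ≤ 10 ^ 5
  · rw [if_pos hg, if_neg (by rw [hmod2] at hg ⊢; push_neg; omega)]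
    have hfd : PySem.Int.floordiv ((A.length : Nat) : Int) 2 = ((A.length / 2 : Nat) : Int) := by
      exact_mod_cast PySem.Int.floordiv_natCast A.length 2
    rw [hfd, PySem.List.slice_to_natCast, PySem.List.slice_from_natCast]
    have hlen2 : (A.drop (A.length / 2)).length ≤ A.length / 2 := by
      rw [hmod2] at hg
      simp only [List.length_drop]
      omega
    rw [zip_take_of_len_le (A.drop (A.length / 2)) A (A.length / 2) hlen2]
    rw [foldl_pair_eq (fun nn : Int × Int =>
        1 ≤ nn.1 ∧ nn.1 ≤ 10 ^ 5 ∧ 1 ≤ nn.2 ∧ nn.2 ≤ 10 ^ 5)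
      (fun nn => (PySem.List.pyGet? (PySem.Int.toChars nn.1) 0).getD ' ')
      (fun nn => (PySem.List.pyGet? (PySem.Int.toChars nn.2)
          (((PySem.Int.toChars nn.2).length : Int) - 1)).getD ' ') _ [] []]
    simp only [List.nil_append]
    set pairs := (A.zip (A.drop (A.length / 2))).filter (fun nn : Int × Int =>
      decide (1 ≤ nn.1 ∧ nn.1 ≤ 10 ^ 5 ∧ 1 ≤ nn.2 ∧ nn.2 ≤ 10 ^ 5)) with hpairs
    have hmem : ∀ p ∈ pairs, 1 ≤ p.1 ∧ p.1 ≤ 10 ^ 5 ∧ 1 ≤ p.2 ∧ p.2 ≤ 10 ^ 5 := by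
      intro p hp
      have := List.of_mem_filter hp
      simpa using this
    have hmap1 : pairs.map (fun nn => (PySem.List.pyGet? (PySem.Int.toChars nn.1) 0).getD ' ')
        = (pairs.map (fun p => pvLead p.1)).map (fun d => Char.ofNat (48 + d.toNat)) := by
      rw [List.map_map]
      apply List.map_congr_left
      intro p hp
      exact first_char_eq p.1 (hmem p hp).1
    have hmap2 : pairs.map (fun nn => (PySem.List.pyGet? (PySem.Int.toChars nn.2)
          (((PySem.Int.toChars nn.2).length : Int) - 1)).getD ' ')
        = (pairs.map (fun p => PySem.Int.mod p.2 10)).map (fun d => Char.ofNat (48 + d.toNat)) := by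
      rw [List.map_map]
      apply List.map_congr_left
      intro p hp
      exact last_char_eq p.2 (hmem p hp).2.2.1
    rw [hmap1, hmap2]
    set ds1 := pairs.map (fun p => pvLead p.1) with hds1
    set ds2 := pairs.map (fun p => PySem.Int.mod p.2 10) with hds2
    have hd1b : ∀ d ∈ ds1, 0 ≤ d ∧ d < 10 := by
      intro d hd
      rw [hds1] at hd
      obtain ⟨p, hp, rfl⟩ := List.mem_map.mp hd
      have h1 := pvLead_pos p.1 (hmem p hp).1
      have h2 := pvLead_lt p.1 (hmem p hp).1
      omega
    have hd2b : ∀ d ∈ ds2, 0 ≤ d ∧ d < 10 := by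
      intro d hd
      rw [hds2] at hd
      obtain ⟨p, hp, rfl⟩ := List.mem_map.mp hd
      exact ⟨PySem.Int.mod_nonneg _ (by norm_num), PySem.Int.mod_lt _ (by norm_num)⟩
    obtain ⟨q, hqmem, hqcond⟩ := hPre hg
    have hqpairs : q ∈ pairs := by
      rw [hpairs]
      exact List.mem_filter.mpr ⟨hqmem, by simpa using hqcond⟩
    have hplen : pairs ≠ [] := List.ne_nil_of_mem hqpairs
    have hne : ds1.map (fun d => Char.ofNat (48 + d.toNat))
        ++ ds2.map (fun d => Char.ofNat (48 + d.toNat)) ≠ [] := by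
      simp only [ne_eq, List.append_eq_nil_iff, List.map_eq_nil_iff, hds1, hds2]
      intro h
      exact hplen (by simpa using h.1)
    rw [pyIntDigits?_ne_nil _ hne, List.foldl_append,
      foldl_digit_chars ds1 hd1b 0, foldl_digit_chars ds2 hd2b _,
      show (ds2.foldl (fun a d => a * 10 + d) (ds1.foldl (fun a d => a * 10 + d) 0))
          = pvVal (ds1 ++ ds2) from by rw [pvVal, List.foldl_append]]
    have hBfold : (A.zip (A.drop (A.length / 2))).foldl
        (fun (st : Int × Int × Int) p =>
          if 1 ≤ p.1 ∧ p.1 ≤ 10 ^ 5 ∧ 1 ≤ p.2 ∧ p.2 ≤ 10 ^ 5 then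
            (PySem.Int.mod (st.1 * 10 + pvLead p.1) 11,
             PySem.Int.mod (st.2.1 * 10 + PySem.Int.mod p.2 10) 11,
             st.2.2 + 1)
          else st) (0, 0, 0)
        = (pvVal ds1 % 11, pvVal ds2 % 11, (pairs.length : Int)) := by
      rw [PySem.List.foldl_ite_eq_foldl_filter
        (fun p : Int × Int => 1 ≤ p.1 ∧ p.1 ≤ 10 ^ 5 ∧ 1 ≤ p.2 ∧ p.2 ≤ 10 ^ 5)
        (fun (st : Int × Int × Int) p =>
          (PySem.Int.mod (st.1 * 10 + pvLead p.1) 11,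
           PySem.Int.mod (st.2.1 * 10 + PySem.Int.mod p.2 10) 11,
           st.2.2 + 1)) _ _, ← hpairs]
      rw [PySem.List.foldl_prod_mk
        (f := fun (s : Int) (p : Int × Int) => PySem.Int.mod (s * 10 + pvLead p.1) 11)
        (g := fun (s2 : Int × Int) (p : Int × Int) =>
          (PySem.Int.mod (s2.1 * 10 + PySem.Int.mod p.2 10) 11, s2.2 + 1))]
      rw [PySem.List.foldl_prod_mk
        (f := fun (s : Int) (p : Int × Int) => PySem.Int.mod (s * 10 + PySem.Int.mod p.2 10) 11)
        (g := fun (c : Int) (_ : Int × Int) => c + 1)]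
      refine congrArg₂ Prod.mk ?_ (congrArg₂ Prod.mk ?_ ?_)
      · calc pairs.foldl (fun (s : Int) p => PySem.Int.mod (s * 10 + pvLead p.1) 11) 0
            = ds1.foldl (fun a d => (a * 10 + d) % 11) (0 % 11) := by
              rw [PySem.List.foldl_congr_mem pairs _
                (fun (s : Int) p => (s * 10 + pvLead p.1) % 11) 0
                (fun acc x _ => PySem.Int.mod_eq_emod_of_pos (by norm_num)),
                ← List.foldl_map (f := fun p : Int × Int => pvLead p.1)
                  (g := fun (a d : Int) => (a * 10 + d) % 11), ← hds1]
              norm_num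
        _ = (ds1.foldl (fun a d => a * 10 + d) 0) % 11 := hornerMod_eq ds1 0
        _ = pvVal ds1 % 11 := by rw [pvVal]
      · calc pairs.foldl (fun (s : Int) p => PySem.Int.mod (s * 10 + PySem.Int.mod p.2 10) 11) 0
            = ds2.foldl (fun a d => (a * 10 + d) % 11) (0 % 11) := by
              rw [PySem.List.foldl_congr_mem pairs _
                (fun (s : Int) p => (s * 10 + PySem.Int.mod p.2 10) % 11) 0
                (fun acc x _ => PySem.Int.mod_eq_emod_of_pos (by norm_num)),
                ← List.foldl_map (f := fun p : Int × Int => PySem.Int.mod p.2 10)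
                  (g := fun (a d : Int) => (a * 10 + d) % 11), ← hds2]
              norm_num
        _ = (ds2.foldl (fun a d => a * 10 + d) 0) % 11 := hornerMod_eq ds2 0
        _ = pvVal ds2 % 11 := by rw [pvVal]
      · rw [foldl_count_len]
        norm_num
    rw [hBfold]
    dsimp only
    have hL : ds2.length = pairs.length := by rw [hds2]; simp
    have hml : PySem.Int.mod ((pairs.length : Nat) : Int) 2 = ((pairs.length : Nat) : Int) % 2 :=
      PySem.Int.mod_eq_emod_of_pos (by norm_num)
    set t : Int := if PySem.Int.mod ((pairs.length : Nat) : Int) 2 ≠ 0 then 10 else 1 with hT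
    have ht : t % 11 = (10:Int) ^ pairs.length % 11 := by
      rw [tenpow_mod, hT]
      by_cases hp2 : pairs.length % 2 = 0
      · rw [if_neg (by rw [hml]; omega), if_pos hp2]
        norm_num
      · rw [if_pos (by rw [hml]; omega), if_neg hp2]
        norm_num
    have key : PySem.Int.mod (pvVal (ds1 ++ ds2)) 11
        = PySem.Int.mod ((pvVal ds1 % 11) * t + pvVal ds2 % 11) 11 := by
      rw [PySem.Int.mod_eq_emod_of_pos (by norm_num), PySem.Int.mod_eq_emod_of_pos (by norm_num),
        pvVal_append, hL]
      have m1 : Int.ModEq 11 (pvVal ds1 % 11) (pvVal ds1) := Int.emod_emod_of_dvd _ dvd_rfl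
      have mt : Int.ModEq 11 t ((10:Int) ^ pairs.length) := ht
      have m2 : Int.ModEq 11 (pvVal ds2 % 11) (pvVal ds2) := Int.emod_emod_of_dvd _ dvd_rfl
      exact ((m1.mul mt).add m2).symm
    rw [key]
  · rw [if_neg hg, if_pos (by rw [hmod2] at hg ⊢; omega)]
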